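-- pv_equiv track=rewrite | github.com/manyb2ns/programmers_python | lv.1/과일장수.py | solution
-- ===== SOURCE A (Python) =====
-- def solution(k, m, score):  # 사과 최대점수, 박스에 담기는 사과 개수, 사과 무더기
--     answer = 0
--     dict = {}   # 사과 점수(key)별 사과 개수(value)
--
--     # 사과 최대점수(k)만큼 반복
--     # 3부터 k까지 사과 점수별 사과 개수 카운트
--     for i in range(1, k+1):
--         if i in score:
--             dict[i] = score.count(i)
--
--     # 사과 점수가 높은 것부터 반복문 시작
--     # (m보다 모자를 경우 그 아래 값으로 count 넘겨주기)
--     i = 0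
--     key_array = list(reversed(dict.keys()))
--     for key in key_array:
--         if dict[key] % m == 0:  answer += key * dict[key]
--         else:
--             answer += key * (dict[key] - (dict[key]%m))
--             # if key >= 2: dict[key_array[i+1]] += dict[key] % m
--             if i < len(key_array)-1 : dict[key_array[i+1]] += dict[key] % m
--         i += 1
--
--     return answer
-- ===== SOURCE B (Python) =====
-- def solution(k, m, score):
--     # sort the in-range scores descending; every m-th element (0-based m-1, 2m-1, ...)
--     # is the minimum of one full box, and each full box of m apples sells at m * its minimum
--     vals = sorted((s for s in score if 1 <= s <= k), reverse=True)
--     answer = 0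
--     for i in range(m - 1, len(vals), m):
--         answer += vals[i] * m
--     return answer
-- ===== Notes on version B (the rewrite author's own statement) =====
-- stated objective: faster
-- what changed: A builds a per-score count dict by scanning score with count() for every key in range(1,k+1) and then walks the keys descending, carrying each key's remainder into the next key's count; B sorts the in-range scores descending once and sums vals[i]*m at i = m-1, 2m-1, ... (each full box priced at its minimum).
-- outside the precondition, e.g. on solution(0, 0, []): A returns 0, B raises ValueError; on solution(3, -2, [1, 2, 2]): A returns 6, B returns 0
import Mathlib
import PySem

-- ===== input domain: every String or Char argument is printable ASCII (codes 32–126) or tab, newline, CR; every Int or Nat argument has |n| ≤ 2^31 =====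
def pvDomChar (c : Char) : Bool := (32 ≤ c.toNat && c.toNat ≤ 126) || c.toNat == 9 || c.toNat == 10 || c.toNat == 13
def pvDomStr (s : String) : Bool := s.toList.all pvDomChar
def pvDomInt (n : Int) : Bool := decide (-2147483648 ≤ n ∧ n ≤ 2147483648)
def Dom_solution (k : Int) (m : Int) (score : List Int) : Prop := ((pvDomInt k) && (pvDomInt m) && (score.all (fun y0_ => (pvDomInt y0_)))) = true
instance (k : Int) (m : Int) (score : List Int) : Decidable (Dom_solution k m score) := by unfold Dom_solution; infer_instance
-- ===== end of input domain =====

-- B replaces A's per-score count table with descending carry by one sort-descending pass that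
-- prices every m-th element (each full box's minimum) — objective: faster (no per-key rescan of score).

-- ===== PORT A =====
-- the body of A's second for-loop (state = (answer, i, dict)); ka is key_array
def solGo (m : Int) (ka : List Int) (st : Int × Int × PySem.Dict Int Int) (key : Int) :
    Int × Int × PySem.Dict Int Int :=
  let answer := st.1
  let i := st.2.1
  let d := st.2.2
  if PySem.Int.mod (d.getD key 0) m == 0 then
    (answer + key * d.getD key 0, i + 1, d)
  else
    let answer := answer + key * (d.getD key 0 - PySem.Int.mod (d.getD key 0) m)
    let d' :=
      if i < (ka.length : Int) - 1 then
        -- key_array[i+1]: the guard keeps i+1 strictly inside ka, so pyGetD's default is never used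
        let nk := PySem.List.pyGetD ka (i + 1) 0
        d.insert nk (d.getD nk 0 + PySem.Int.mod (d.getD key 0) m)
      else d
    (answer, i + 1, d')

def solution (k : Int) (m : Int) (score : List Int) : Int :=
  let dict := (PySem.List.pyRange 1 (k + 1) 1).foldl
      (fun d i => if i ∈ score then d.insert i ((PySem.List.count score i : Int)) else d)
      PySem.Dict.empty
  let keyArray := dict.keys.reverse
  (keyArray.foldl (solGo m keyArray) (0, 0, dict)).1

-- ===== PORT B =====
def solution_alt (k : Int) (m : Int) (score : List Int) : Int :=
  let vals := PySem.List.sorted (score.filter (fun s => decide (1 ≤ s ∧ s ≤ k))) (fun x => x) true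
  (PySem.List.pyRange (m - 1) ((vals.length : Int)) m).foldl
    (fun answer i => answer + PySem.List.pyGetD vals i 0 * m) 0

-- ===== PRECONDITION & SPEC =====
-- Pre_ excludes m = 0, where A raises ZeroDivisionError (or, with no in-range score, returns 0) while
-- B's range(-1, len, 0) raises ValueError, and m < 0 with an in-range score, outside the problem's
-- natural domain (m is the box size), where A returns values of Python's negative-divisor modulo and B returns 0.
def Pre_solution (k : Int) (m : Int) (score : List Int) : Prop :=
  1 ≤ m ∨ (m < 0 ∧ ∀ s ∈ score, ¬(1 ≤ s ∧ s ≤ k))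
instance (k : Int) (m : Int) (score : List Int) : Decidable (Pre_solution k m score) := by unfold Pre_solution; infer_instance
def pvWitness_solution : Int × Int × List Int := (4, 3, [4, 1, 2, 2, 4, 4, 4, 4, 3, 3])

def Spec_solution (k : Int) (m : Int) (score : List Int) (out : Int) : Prop := out = solution_alt k m score
instance (k : Int) (m : Int) (score : List Int) (out : Int) : Decidable (Spec_solution k m score out) := by unfold Spec_solution; infer_instance

-- ===== CLAIM (what is proved, stated in full; the proofs are below) =====
def Claim_equal_solution : Prop := ∀ (k : Int) (m : Int) (score : List Int), Dom_solution k m score → Pre_solution k m score → Spec_solution k m score (solution k m score)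

-- ===== LEMMAS AND PROOFS =====

-- the scores present in [1, k], ascending (A's dict keys)
def keysP (k : Int) (score : List Int) : List Int :=
  (PySem.List.pyRange 1 (k + 1) 1).filter (fun i => decide (i ∈ score))

-- A's descending pass in carry form: per key, price the full boxes at the key, carry the remainder down
def carry (m : Int) : List (Int × Int) → Int → Int
  | [], _ => 0
  | (key, c) :: rest, r =>
      key * ((c + r) - PySem.Int.mod (c + r) m) + carry m rest (PySem.Int.mod (c + r) m)

-- B's strided loop with its start index generalized
def stride (m : Int) (vals : List Int) (j : Int) (ans : Int) : Int :=
  (PySem.List.pyRange j ((vals.length : Int)) m).foldl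
    (fun answer i => answer + PySem.List.pyGetD vals i 0 * m) ans

lemma keysP_nodup (k : Int) (score : List Int) : (keysP k score).Nodup :=
  (PySem.List.nodup_pyRange_one 1 (k + 1)).filter _

lemma keysP_pairwise (k : Int) (score : List Int) : (keysP k score).Pairwise (· < ·) :=
  (PySem.List.pairwise_lt_pyRange_one 1 (k + 1)).sublist List.filter_sublist

lemma mem_keysP (k : Int) (score : List Int) (a : Int) :
    a ∈ keysP k score ↔ (1 ≤ a ∧ a ≤ k) ∧ a ∈ score := by
  simp [keysP, PySem.List.mem_pyRange_one]

-- items of A's dict: one (key, count) pair per present in-range score, ascending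
lemma dict_items (k : Int) (score : List Int) :
    ((PySem.List.pyRange 1 (k + 1) 1).foldl
      (fun d i => if i ∈ score then d.insert i ((PySem.List.count score i : Int)) else d)
      PySem.Dict.empty).items
    = (keysP k score).map (fun i => (i, (PySem.List.count score i : Int))) := by
  unfold keysP
  rw [PySem.List.foldl_ite_eq_foldl_filter (p := fun i => i ∈ score)
    (f := fun (d : PySem.Dict Int Int) i => d.insert i ((PySem.List.count score i : Int)))]
  rw [PySem.Dict.items_foldl_insert_fresh ((PySem.List.pyRange 1 (k + 1) 1).filter (fun i => decide (i ∈ score)))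
      (fun i => i) (fun i => (PySem.List.count score i : Int)) PySem.Dict.empty
      (by intro a _; simp [PySem.Dict.contains_empty]) (by simpa using keysP_nodup k score)]
  simp [PySem.Dict.empty]

-- A's loop over the remaining keys equals the carry pass, given the dict invariant:
-- the next key's stored count already holds the carried remainder r, later keys are untouched
lemma loopA (m : Int) (cnt : Int → Int) (ka : List Int) (hnd : ka.Nodup) :
    ∀ (suf pre : List Int), ka = pre ++ suf →
    ∀ (ans r : Int) (d : PySem.Dict Int Int),
      (∀ x ∈ suf.head?, d.getD x 0 = cnt x + r) →
      (∀ y ∈ suf.tail, d.getD y 0 = cnt y) →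
      (suf.foldl (solGo m ka) (ans, (pre.length : Int), d)).1
        = ans + carry m (suf.map (fun x => (x, cnt x))) r := by
  intro suf
  induction suf with
  | nil => intro pre _ ans r d _ _; simp [carry]
  | cons x rest ih =>
      intro pre hsplit ans r d hhead htail
      have hvx : d.getD x 0 = cnt x + r := hhead x (by simp)
      rw [List.foldl_cons]
      set r' := PySem.Int.mod (cnt x + r) m with hr'
      have hka : ka.length = pre.length + 1 + rest.length := by
        simp [hsplit]; omega
      have hlenx : ((pre.length : Int) + 1) = ((pre ++ [x]).length : Int) := by simp
      by_cases hz : PySem.Int.mod (d.getD x 0) m == 0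
      · -- then branch: remainder is zero, no mutation
        have hz' : r' = 0 := by rw [hr', ← hvx]; exact beq_iff_eq.mp hz
        have hstep : solGo m ka (ans, (pre.length : Int), d) x
            = (ans + x * d.getD x 0, (pre.length : Int) + 1, d) := by
          simp [solGo, hz]
        rw [hstep, hlenx, ih (pre ++ [x]) (by simp [hsplit]) _ r' d
          (by intro y hy
              rcases rest with _ | ⟨z, rest'⟩
              · simp at hy
              · simp only [List.head?_cons, Option.mem_some_iff] at hy
                subst hy
                rw [htail z (by simp), hz']; ring)
          (by intro y hy
              rcases rest with _ | ⟨z, rest'⟩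
              · simp at hy
              · exact htail y (by simp at hy ⊢; exact Or.inr hy))]
        simp only [List.map_cons, carry, ← hr']
        rw [hvx]
        have h2 : cnt x + r - r' = cnt x + r := by rw [hz']; ring
        rw [h2]
        ring
      · -- else branch
        have hguard : ((pre.length : Int) < (ka.length : Int) - 1) ↔ rest ≠ [] := by
          rcases rest with _ | ⟨z, rest'⟩ <;> simp [hka] <;> omega
        rcases rest with _ | ⟨z, rest'⟩
        · -- last key: the guard is false, the remainder is dropped
          have hstep : solGo m ka (ans, (pre.length : Int), d) x
              = (ans + x * (d.getD x 0 - PySem.Int.mod (d.getD x 0) m), (pre.length : Int) + 1, d) := by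
            simp only [solGo]
            rw [if_neg (by simpa using hz), if_neg ((not_iff_not.mpr hguard).mpr (by simp))]
          rw [hstep]
          simp only [List.map_cons, List.map_nil, carry, List.foldl_nil]
          rw [hvx, ← hr']
          ring
        · -- carry into z = ka[pre.length + 1]
          have hik : PySem.List.pyGetD ka ((pre.length : Int) + 1) 0 = z := by
            have hc : ((pre.length : Int) + 1) = (((pre.length + 1 : Nat)) : Int) := by push_cast; ring
            rw [hc, PySem.List.pyGetD_natCast, hsplit, List.getD_eq_getElem?_getD]
            simp
          have hsuf_nd : (x :: z :: rest').Nodup := by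
            rw [hsplit] at hnd
            exact (List.nodup_append.mp hnd).2.1
          have hxnot : x ∉ z :: rest' := (List.nodup_cons.mp hsuf_nd).1
          have hzx : z ≠ x := fun h => hxnot (by rw [← h]; exact List.mem_cons_self)
          have hstep : solGo m ka (ans, (pre.length : Int), d) x
              = (ans + x * (d.getD x 0 - PySem.Int.mod (d.getD x 0) m), (pre.length : Int) + 1,
                 d.insert z (d.getD z 0 + PySem.Int.mod (d.getD x 0) m)) := by
            simp only [solGo]
            rw [if_neg (by simpa using hz), if_pos (hguard.mpr (by simp)), hik]
          rw [hstep]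
          have hnodup_rest : (z :: rest').Nodup := (List.nodup_cons.mp hsuf_nd).2
          rw [hlenx, ih (pre ++ [x]) (by simp [hsplit]) _ r' _
            (by intro y hy
                simp only [List.head?_cons, Option.mem_some_iff] at hy
                subst hy
                rw [PySem.Dict.getD_insert_self, htail z (by simp), hvx, hr'])
            (by intro y hy
                simp only [List.tail_cons] at hy
                have hyz : y ≠ z := by
                  intro h; subst h; exact (List.nodup_cons.mp hnodup_rest).1 hy
                rw [PySem.Dict.getD_insert_of_ne _ _ _ hyz, htail y (by simp [hy])])]
          simp only [List.map_cons, carry, ← hr']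
          rw [hvx, ← hr']
          ring

lemma count_flatMap_replicate (n : Int → Nat) (a : Int) :
    ∀ (ks : List Int), ks.Nodup →
      (ks.flatMap (fun key => List.replicate (n key) key)).count a
        = if a ∈ ks then n a else 0 := by
  intro ks
  induction ks with
  | nil => simp
  | cons x rest ih =>
      intro hnd
      rw [List.flatMap_cons, List.count_append, List.count_replicate,
        ih (List.nodup_cons.mp hnd).2]
      by_cases hax : a = x
      · subst hax
        simp [(List.nodup_cons.mp hnd).1]
      · simp [hax, Ne.symm hax]

lemma pairwise_flatMap_replicate (n : Int → Nat) :
    ∀ (ks : List Int), ks.Pairwise (· > ·) →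
      (ks.flatMap (fun key => List.replicate (n key) key)).Pairwise (fun a b => b ≤ a) := by
  intro ks
  induction ks with
  | nil => simp
  | cons x rest ih =>
      intro hp
      rw [List.flatMap_cons, List.pairwise_append]
      refine ⟨List.pairwise_replicate.mpr (Or.inr le_rfl), ih (List.pairwise_cons.mp hp).2, ?_⟩
      intro a ha b hb
      have hax : a = x := List.eq_of_mem_replicate ha
      obtain ⟨key, hk, hbk⟩ := List.mem_flatMap.mp hb
      have hbkey : b = key := List.eq_of_mem_replicate hbk
      subst hax hbkey
      exact le_of_lt ((List.pairwise_cons.mp hp).1 b hk)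

-- B's sorted-descending in-range scores, segmented into the descending keys' replicated counts
lemma vals_eq (k : Int) (score : List Int) :
    PySem.List.sorted (score.filter (fun s => decide (1 ≤ s ∧ s ≤ k))) (fun x => x) true
    = (keysP k score).reverse.flatMap (fun key => List.replicate (PySem.List.count score key) key) := by
  apply PySem.List.eq_of_perm_of_pairwise_le_of_injective (fun x : Int => -x) neg_injective
  · apply ((PySem.List.sorted_perm _ _ _).trans)
    rw [List.perm_iff_count]
    intro a
    rw [count_flatMap_replicate _ a _ (by simpa using keysP_nodup k score)]
    simp only [List.mem_reverse, mem_keysP, PySem.List.count]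
    by_cases h1 : (1 ≤ a ∧ a ≤ k)
    · by_cases h2 : a ∈ score
      · rw [List.count_filter (by simpa using h1)]
        simp [h1, h2]
      · rw [if_neg (by tauto)]
        exact List.count_eq_zero_of_not_mem (fun hmem => h2 (List.mem_of_mem_filter hmem))
    · rw [if_neg (by tauto)]
      apply List.count_eq_zero_of_not_mem
      intro hmem
      have := List.of_mem_filter hmem
      simp at this
      exact h1 this
  · have := PySem.List.sorted_pairwise_rev (score.filter (fun s => decide (1 ≤ s ∧ s ≤ k))) (fun x : Int => x)
    exact this.imp (fun h => by simpa using h)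
  · have hp : (keysP k score).reverse.Pairwise (· > ·) := by
      rw [List.pairwise_reverse]
      exact (keysP_pairwise k score).imp (fun h => h)
    exact (pairwise_flatMap_replicate _ _ hp).imp (fun h => by simpa using h)

lemma pyRange_pos_shift (a b s : Int) (hs : 0 < s) :
    PySem.List.pyRange (a + 1) (b + 1) s = (PySem.List.pyRange a b s).map (· + 1) := by
  rw [PySem.List.pyRange_of_pos _ _ hs, PySem.List.pyRange_of_pos _ _ hs, List.map_map]
  have h1 : a + 1 < b + 1 ↔ a < b := by omega
  have h2 : b + 1 - (a + 1) = b - a := by ring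
  simp only [h2, h1]
  exact List.map_congr_left (fun x _ => by simp; ring)

lemma pyRange_pos_nil (a b s : Int) (hs : 0 < s) (h : b ≤ a) :
    PySem.List.pyRange a b s = [] := by
  rw [PySem.List.pyRange_of_pos _ _ hs, if_neg (by omega)]
  simp

lemma pyRange_pos_cons (a b s : Int) (hs : 0 < s) (h : a < b) :
    PySem.List.pyRange a b s = a :: PySem.List.pyRange (a + s) b s := by
  rw [PySem.List.pyRange_of_pos _ _ hs, PySem.List.pyRange_of_pos _ _ hs, if_pos h]
  have key : (b - a + s - 1) / s = (if a + s < b then (b - (a + s) + s - 1) / s else 0) + 1 := by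
    by_cases hc : a + s < b
    · rw [if_pos hc]
      have : b - a + s - 1 = (b - (a + s) + s - 1) + 1 * s := by ring
      rw [this, Int.add_mul_ediv_right _ _ (by omega)]
    · rw [if_neg hc]
      have h1 : 1 * s ≤ b - a + s - 1 := by omega
      have h2 : b - a + s - 1 < (1 + 1) * s := by omega
      have := (PySem.Int.floordiv_eq_iff_of_pos (a := b - a + s - 1) (b := s) (q := 1) hs).mpr ⟨h1, h2⟩
      rw [PySem.Int.floordiv_eq_ediv_of_pos hs] at this
      omega
  rw [key]
  have hnn : 0 ≤ (if a + s < b then (b - (a + s) + s - 1) / s else 0) := by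
    by_cases hc : a + s < b
    · rw [if_pos hc]; exact Int.ediv_nonneg (by omega) (by omega)
    · simp [hc]
  rw [Int.toNat_add hnn (by omega)]
  have hsplit : (if a + s < b then (b - (a + s) + s - 1) / s else 0).toNat
      = if a + s < b then ((b - (a + s) + s - 1) / s).toNat else 0 := by
    split <;> simp
  rw [hsplit, show Int.toNat 1 = 1 from rfl, List.range_succ_eq_map]
  simp only [List.map_cons, List.map_map, Nat.cast_zero, mul_zero, add_zero]
  congr 1
  exact List.map_congr_left (fun x _ => by push_cast [Function.comp, Nat.succ_eq_add_one]; ring)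

lemma stride_nil (m j ans : Int) (hm : 0 < m) (hj : 0 ≤ j) : stride m [] j ans = ans := by
  unfold stride
  rw [pyRange_pos_nil _ _ _ hm (by simp; omega)]
  rfl

lemma shift_fold (m : Int) (x : Int) (rest : List Int) (a b ans : Int) (hs : 0 < m) (ha : 0 ≤ a) :
    ((PySem.List.pyRange a b m).map (· + 1)).foldl
      (fun answer i => answer + PySem.List.pyGetD (x :: rest) i 0 * m) ans
    = (PySem.List.pyRange a b m).foldl
      (fun answer i => answer + PySem.List.pyGetD rest i 0 * m) ans := by
  rw [List.foldl_map]
  apply PySem.List.foldl_congr_mem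
  intro acc i hi
  have hi' := (PySem.List.mem_pyRange_iff_of_pos hs i).mp hi
  rw [PySem.List.pyGetD_of_nonneg _ _ (by omega), PySem.List.pyGetD_of_nonneg _ _ (by omega : (0:Int) ≤ i)]
  congr 1
  have h1 : (i + 1).toNat = i.toNat + 1 := by omega
  rw [h1]
  rfl

lemma stride_peel (m : Int) (x : Int) (rest : List Int) (j ans : Int) (hm : 0 < m) (hj : 0 ≤ j) :
    stride m (x :: rest) j ans
      = if j = 0 then stride m rest (m - 1) (ans + x * m) else stride m rest (j - 1) ans := by
  unfold stride
  have hlen : ((x :: rest).length : Int) = (rest.length : Int) + 1 := by simp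
  by_cases h0 : j = 0
  · subst h0
    rw [if_pos rfl, hlen, pyRange_pos_cons _ _ _ hm (by omega), List.foldl_cons]
    have hx : PySem.List.pyGetD (x :: rest) 0 0 = x := by
      rw [PySem.List.pyGetD_of_nonneg _ _ le_rfl]; rfl
    rw [hx, show (0 : Int) + m = m by ring]
    have hsh : PySem.List.pyRange m ((rest.length : Int) + 1) m
        = (PySem.List.pyRange (m - 1) ((rest.length : Int)) m).map (· + 1) := by
      have := pyRange_pos_shift (m - 1) ((rest.length : Int)) m hm
      simpa using this
    rw [hsh, shift_fold m x rest _ _ _ hm (by omega)]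
  · rw [if_neg h0, hlen]
    have hsh : PySem.List.pyRange j ((rest.length : Int) + 1) m
        = (PySem.List.pyRange (j - 1) ((rest.length : Int)) m).map (· + 1) := by
      have := pyRange_pos_shift (j - 1) ((rest.length : Int)) m hm
      simpa using this
    rw [hsh, shift_fold m x rest _ _ _ hm (by omega)]

lemma mod_small (r m : Int) (h0 : 0 ≤ r) (h1 : r < m) : PySem.Int.mod r m = r := by
  rw [PySem.Int.mod_eq_emod_of_pos (by omega)]
  exact Int.emod_eq_of_lt h0 h1

-- one key's segment of the strided pass: c copies of key starting with r of the current box filled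
lemma stride_segment (m key : Int) (hm : 0 < m) :
    ∀ (c : Nat) (rest : List Int) (r ans : Int), 0 ≤ r → r < m →
      stride m (List.replicate c key ++ rest) (m - 1 - r) ans
        = stride m rest (m - 1 - PySem.Int.mod ((c : Int) + r) m)
            (ans + key * (((c : Int) + r) - PySem.Int.mod ((c : Int) + r) m)) := by
  intro c
  induction c with
  | zero =>
      intro rest r ans h0 h1
      simp only [List.replicate_zero, List.nil_append, Nat.cast_zero, zero_add]
      rw [mod_small r m h0 h1]
      simp
  | succ n ih =>
      intro rest r ans h0 h1
      rw [List.replicate_succ, List.cons_append,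
        stride_peel m key _ _ ans hm (by omega)]
      by_cases hr : r = m - 1
      · subst hr
        rw [if_pos (by ring)]
        rw [show m - 1 = m - 1 - 0 by ring, ih rest 0 (ans + key * m) le_rfl (by omega)]
        have hmod : PySem.Int.mod (((n : Nat) + 1 : Nat) + (m - 1)) m = PySem.Int.mod ((n : Int)) m := by
          push_cast
          rw [show (n : Int) + 1 + (m - 1) = (n : Int) + 1 * m by ring]
          rw [PySem.Int.mod_eq_emod_of_pos hm, PySem.Int.mod_eq_emod_of_pos hm]
          simp
        simp only [add_zero, sub_zero]
        rw [hmod]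
        congr 1
        push_cast
        ring
      · rw [if_neg (by omega)]
        rw [show m - 1 - r - 1 = m - 1 - (r + 1) by ring]
        rw [ih rest (r + 1) ans (by omega) (by omega)]
        have hc : ((n : Int)) + (r + 1) = (((n : Nat) + 1 : Nat) : Int) + r := by push_cast; ring
        rw [hc]

lemma stride_carry (m : Int) (score : List Int) (hm : 0 < m) :
    ∀ (ks : List Int) (r ans : Int), 0 ≤ r → r < m →
      stride m (ks.flatMap (fun x => List.replicate (PySem.List.count score x) x)) (m - 1 - r) ans
        = ans + carry m (ks.map (fun x => (x, (PySem.List.count score x : Int)))) r := by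
  intro ks
  induction ks with
  | nil => intro r ans h0 h1; rw [List.flatMap_nil, stride_nil m _ ans hm (by omega)]; simp [carry]
  | cons x rest ih =>
      intro r ans h0 h1
      rw [List.flatMap_cons, stride_segment m x hm _ _ r ans h0 h1]
      have hb0 := PySem.Int.mod_nonneg ((PySem.List.count score x : Int) + r) hm
      have hb1 := PySem.Int.mod_lt ((PySem.List.count score x : Int) + r) hm
      rw [ih _ _ hb0 hb1]
      simp [carry]; ring

-- ===== VERDICT (by name: the statement is the Claim_ definition above) =====
theorem solution_spec : Claim_equal_solution := by
  intro k m score _ hpre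
  unfold Spec_solution
  rcases hpre with hm | ⟨hm, hnone⟩
  case inr =>
    -- m < 0 and no score lies in [1, k]: A's dict is empty, B's sorted list and range are empty
    have hkeys0 : keysP k score = [] := by
      unfold keysP
      rw [List.filter_eq_nil_iff]
      intro a ha
      simp only [decide_eq_true_eq]
      intro hmem
      exact hnone a hmem (by have := (PySem.List.mem_pyRange_one).mp ha; omega)
    have hfilter0 : score.filter (fun s => decide (1 ≤ s ∧ s ≤ k)) = [] := by
      rw [List.filter_eq_nil_iff]
      intro a ha
      simpa using hnone a ha
    have hA0 : solution k m score = 0 := by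
      show ((((PySem.List.pyRange 1 (k + 1) 1).foldl
          (fun d i => if i ∈ score then d.insert i ((PySem.List.count score i : Int)) else d)
          PySem.Dict.empty).keys.reverse).foldl _ (0, 0, _)).1 = 0
      have hk0 : ((PySem.List.pyRange 1 (k + 1) 1).foldl
          (fun d i => if i ∈ score then d.insert i ((PySem.List.count score i : Int)) else d)
          PySem.Dict.empty).keys = [] := by
        simp only [PySem.Dict.keys, dict_items k score, hkeys0]
        rfl
      rw [hk0]
      rfl
    have hB0 : solution_alt k m score = 0 := by
      show (PySem.List.pyRange (m - 1)
          (((PySem.List.sorted (score.filter (fun s => decide (1 ≤ s ∧ s ≤ k))) (fun x => x) true).length : Int))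
          m).foldl _ 0 = 0
      have hv0 : PySem.List.sorted (score.filter (fun s => decide (1 ≤ s ∧ s ≤ k))) (fun x => x) true = [] := by
        rw [PySem.List.sorted_eq_nil_iff, hfilter0]
      rw [hv0]
      have hr0 : PySem.List.pyRange (m - 1) ((([] : List Int).length : Int)) m = [] := by
        simp only [List.length_nil, Nat.cast_zero, PySem.List.pyRange]
        rw [if_neg (by omega)]
        simp only [if_neg (by omega : ¬ (0:Int) < m), if_neg (by omega : ¬ (0:Int) < m - 1)]
        simp
      rw [hr0]
      rfl
    rw [hA0, hB0]
  case inl =>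
  have hm : 0 < m := hm
  -- A's dict and key array
  have hitems := dict_items k score
  set dict := (PySem.List.pyRange 1 (k + 1) 1).foldl
      (fun d i => if i ∈ score then d.insert i ((PySem.List.count score i : Int)) else d)
      PySem.Dict.empty with hdict
  have hkeys : dict.keys = keysP k score := by
    simp only [PySem.Dict.keys, hitems, List.map_map]
    simp [Function.comp_def]
  have hknd : (keysP k score).reverse.Nodup := by
    simpa using keysP_nodup k score
  -- A equals the carry pass over the descending present keys
  have hA : solution k m score
      = carry m ((keysP k score).reverse.map (fun x => (x, (PySem.List.count score x : Int)))) 0 := by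
    show ((dict.keys.reverse).foldl (solGo m dict.keys.reverse) (0, 0, dict)).1 = _
    rw [hkeys]
    have hg : ∀ x ∈ keysP k score, dict.getD x 0 = (PySem.List.count score x : Int) := by
      intro x hx
      apply PySem.Dict.getD_of_mem_items dict (v := (PySem.List.count score x : Int))
      · rw [hitems]
        exact List.mem_map.mpr ⟨x, hx, rfl⟩
      · rw [hkeys]; exact keysP_nodup k score
    have := loopA m (fun x => (PySem.List.count score x : Int)) ((keysP k score).reverse) hknd
      ((keysP k score).reverse) [] (by simp) 0 0 dict
      (by intro x hx
          have hxm : x ∈ (keysP k score).reverse := List.mem_of_mem_head? hx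
          rw [hg x (List.mem_reverse.mp hxm)]; ring)
      (by intro y hy
          have hym : y ∈ (keysP k score).reverse := List.mem_of_mem_tail hy
          exact hg y (List.mem_reverse.mp hym))
    simpa using this
  -- B equals the same carry pass
  have hB : solution_alt k m score
      = carry m ((keysP k score).reverse.map (fun x => (x, (PySem.List.count score x : Int)))) 0 := by
    show stride m (PySem.List.sorted (score.filter (fun s => decide (1 ≤ s ∧ s ≤ k))) (fun x => x) true) (m - 1) 0 = _
    rw [vals_eq k score, show m - 1 = m - 1 - 0 by ring,
      stride_carry m score hm ((keysP k score).reverse) 0 0 le_rfl (by omega)]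
    ring
  rw [hA, hB]
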